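-- pv_equiv track=rewrite | github.com/stef41/sentience2vec | scripts/classify_drugs.py | classify_drug
-- ===== SOURCE A (Python) =====
-- DRUG_TO_CLASS = {}
--
-- def classify_drug(drug_name):
--     """Classify a drug by name."""
--     name_lower = drug_name.lower()
--
--     # Direct match
--     if name_lower in DRUG_TO_CLASS:
--         return DRUG_TO_CLASS[name_lower]
--
--     # Try without hyphens/spaces
--     simplified = name_lower.replace(' ', '').replace('-', '').replace('_', '')
--     if simplified in DRUG_TO_CLASS:
--         return DRUG_TO_CLASS[simplified]
--
--     # Pattern matching
--     if any(x in name_lower for x in ['lsd', 'lyserg']):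
--         return 'psychedelic'
--     if any(x in name_lower for x in ['2c-', '25i', '25c', '25b', 'nbome']):
--         return 'psychedelic'
--     if any(x in name_lower for x in ['dmt', 'tryptamine', 'psilocybin', 'psilocin']):
--         return 'psychedelic'
--     if any(x in name_lower for x in ['mescaline', 'phenethylamine']):
--         return 'psychedelic'
--     if any(x in name_lower for x in ['ketamine', 'pcp', 'pce', 'dxm', 'mxe']):
--         return 'dissociative'
--     if any(x in name_lower for x in ['mdma', 'mda', 'apb', 'mapb', 'entactogen']):
--         return 'empathogen'
--     if any(x in name_lower for x in ['amphetamine', 'methamphet', 'cocaine', 'methylphen']):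
--         return 'stimulant'
--     if any(x in name_lower for x in ['cathinone', 'pvp', 'php', 'fma']):
--         return 'stimulant'
--     if any(x in name_lower for x in ['morphine', 'codeine', 'fentanyl', 'oxycodone', 'hydrocodone']):
--         return 'opioid'
--     if any(x in name_lower for x in ['tramadol', 'methadone', 'buprenorphine', 'kratom']):
--         return 'opioid'
--     if any(x in name_lower for x in ['thc', 'cannabinoid', 'jwh', 'cannabis']):
--         return 'cannabinoid'
--     if any(x in name_lower for x in ['diazepam', 'alprazolam', 'clonazepam', 'lorazepam', 'azolam', 'azepam']):
--         return 'depressant'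
--     if any(x in name_lower for x in ['ghb', 'phenibut', 'barbital', 'barbiturate']):
--         return 'depressant'
--     if any(x in name_lower for x in ['diphenhydramine', 'dph', 'scopolamine', 'atropine', 'datura']):
--         return 'deliriant'
--     if any(x in name_lower for x in ['racetam', 'noopept', 'modafinil']):
--         return 'nootropic'
--
--     return 'other'
-- ===== SOURCE B (Python) =====
-- # Re-implementation: one FLAT dict keyword -> (priority, class); classification is
-- # "minimum-priority matched keyword wins" computed in a single pass with a best-so-far
-- # accumulator, instead of A's ordered chain of 15 early-return branches.
-- # (A's two DRUG_TO_CLASS lookups are dropped: that dict is empty, they never fire.)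
-- KEYWORD_TABLE = {
--     'lsd': (0, 'psychedelic'), 'lyserg': (0, 'psychedelic'),
--     '2c-': (1, 'psychedelic'), '25i': (1, 'psychedelic'), '25c': (1, 'psychedelic'),
--     '25b': (1, 'psychedelic'), 'nbome': (1, 'psychedelic'),
--     'dmt': (2, 'psychedelic'), 'tryptamine': (2, 'psychedelic'),
--     'psilocybin': (2, 'psychedelic'), 'psilocin': (2, 'psychedelic'),
--     'mescaline': (3, 'psychedelic'), 'phenethylamine': (3, 'psychedelic'),
--     'ketamine': (4, 'dissociative'), 'pcp': (4, 'dissociative'), 'pce': (4, 'dissociative'),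
--     'dxm': (4, 'dissociative'), 'mxe': (4, 'dissociative'),
--     'mdma': (5, 'empathogen'), 'mda': (5, 'empathogen'), 'apb': (5, 'empathogen'),
--     'mapb': (5, 'empathogen'), 'entactogen': (5, 'empathogen'),
--     'amphetamine': (6, 'stimulant'), 'methamphet': (6, 'stimulant'),
--     'cocaine': (6, 'stimulant'), 'methylphen': (6, 'stimulant'),
--     'cathinone': (7, 'stimulant'), 'pvp': (7, 'stimulant'), 'php': (7, 'stimulant'),
--     'fma': (7, 'stimulant'),
--     'morphine': (8, 'opioid'), 'codeine': (8, 'opioid'), 'fentanyl': (8, 'opioid'),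
--     'oxycodone': (8, 'opioid'), 'hydrocodone': (8, 'opioid'),
--     'tramadol': (9, 'opioid'), 'methadone': (9, 'opioid'),
--     'buprenorphine': (9, 'opioid'), 'kratom': (9, 'opioid'),
--     'thc': (10, 'cannabinoid'), 'cannabinoid': (10, 'cannabinoid'),
--     'jwh': (10, 'cannabinoid'), 'cannabis': (10, 'cannabinoid'),
--     'diazepam': (11, 'depressant'), 'alprazolam': (11, 'depressant'),
--     'clonazepam': (11, 'depressant'), 'lorazepam': (11, 'depressant'),
--     'azolam': (11, 'depressant'), 'azepam': (11, 'depressant'),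
--     'ghb': (12, 'depressant'), 'phenibut': (12, 'depressant'),
--     'barbital': (12, 'depressant'), 'barbiturate': (12, 'depressant'),
--     'diphenhydramine': (13, 'deliriant'), 'dph': (13, 'deliriant'),
--     'scopolamine': (13, 'deliriant'), 'atropine': (13, 'deliriant'),
--     'datura': (13, 'deliriant'),
--     'racetam': (14, 'nootropic'), 'noopept': (14, 'nootropic'),
--     'modafinil': (14, 'nootropic'),
-- }
--
-- def classify_drug(drug_name):
--     """Classify a drug by name."""
--     name_lower = drug_name.lower()
--     best = None
--     for kw, (prio, label) in KEYWORD_TABLE.items():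
--         if kw in name_lower and (best is None or prio < best[0]):
--             best = (prio, label)
--     return 'other' if best is None else best[1]
-- ===== Notes on version B (the rewrite author's own statement) =====
-- stated objective: alternative
-- what changed: Replaces the ordered 15-branch early-return if-chain with a flat keyword->(priority,label) dict scanned once, keeping the minimum-priority matched keyword in a best-so-far accumulator (and drops the two lookups in DRUG_TO_CLASS, which is empty so they never fire); correctness holds because each branch of A maps to one priority and the minimum matched priority is exactly A's first firing branch.
import Mathlib
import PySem

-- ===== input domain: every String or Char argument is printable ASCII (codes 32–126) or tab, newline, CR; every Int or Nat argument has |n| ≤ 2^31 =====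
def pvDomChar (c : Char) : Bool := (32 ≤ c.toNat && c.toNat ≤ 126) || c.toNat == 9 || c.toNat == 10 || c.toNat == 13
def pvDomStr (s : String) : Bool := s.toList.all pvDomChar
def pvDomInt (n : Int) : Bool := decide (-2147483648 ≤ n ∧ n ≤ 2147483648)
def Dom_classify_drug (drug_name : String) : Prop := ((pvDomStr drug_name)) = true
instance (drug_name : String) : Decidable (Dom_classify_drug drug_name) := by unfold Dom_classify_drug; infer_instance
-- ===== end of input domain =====

-- B replaces A's ordered 15-branch early-return chain by a flat keyword->(priority,label)
-- table scanned once with a minimum-priority best-so-far accumulator; A's two lookups in the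
-- empty DRUG_TO_CLASS dict are dropped. Same results; objective: alternative.

-- ===== PORT A =====
def DRUG_TO_CLASS : PySem.Dict String String := PySem.Dict.empty

def classify_drug (drug_name : String) : String :=
  let name_lower := PySem.Str.lower drug_name
  -- Direct match
  match DRUG_TO_CLASS.get? name_lower with
  | some v => v
  | none =>
    -- Try without hyphens/spaces
    let simplified := PySem.Str.replace (PySem.Str.replace (PySem.Str.replace name_lower " " "") "-" "") "_" ""
    match DRUG_TO_CLASS.get? simplified with
    | some v => v
    | none =>
      -- Pattern matching
      if ["lsd", "lyserg"].any (fun x => PySem.Str.isIn x name_lower) then "psychedelic"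
      else if ["2c-", "25i", "25c", "25b", "nbome"].any (fun x => PySem.Str.isIn x name_lower) then "psychedelic"
      else if ["dmt", "tryptamine", "psilocybin", "psilocin"].any (fun x => PySem.Str.isIn x name_lower) then "psychedelic"
      else if ["mescaline", "phenethylamine"].any (fun x => PySem.Str.isIn x name_lower) then "psychedelic"
      else if ["ketamine", "pcp", "pce", "dxm", "mxe"].any (fun x => PySem.Str.isIn x name_lower) then "dissociative"
      else if ["mdma", "mda", "apb", "mapb", "entactogen"].any (fun x => PySem.Str.isIn x name_lower) then "empathogen"
      else if ["amphetamine", "methamphet", "cocaine", "methylphen"].any (fun x => PySem.Str.isIn x name_lower) then "stimulant"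
      else if ["cathinone", "pvp", "php", "fma"].any (fun x => PySem.Str.isIn x name_lower) then "stimulant"
      else if ["morphine", "codeine", "fentanyl", "oxycodone", "hydrocodone"].any (fun x => PySem.Str.isIn x name_lower) then "opioid"
      else if ["tramadol", "methadone", "buprenorphine", "kratom"].any (fun x => PySem.Str.isIn x name_lower) then "opioid"
      else if ["thc", "cannabinoid", "jwh", "cannabis"].any (fun x => PySem.Str.isIn x name_lower) then "cannabinoid"
      else if ["diazepam", "alprazolam", "clonazepam", "lorazepam", "azolam", "azepam"].any (fun x => PySem.Str.isIn x name_lower) then "depressant"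
      else if ["ghb", "phenibut", "barbital", "barbiturate"].any (fun x => PySem.Str.isIn x name_lower) then "depressant"
      else if ["diphenhydramine", "dph", "scopolamine", "atropine", "datura"].any (fun x => PySem.Str.isIn x name_lower) then "deliriant"
      else if ["racetam", "noopept", "modafinil"].any (fun x => PySem.Str.isIn x name_lower) then "nootropic"
      else "other"

-- ===== PORT B =====
-- the flat KEYWORD_TABLE dict of Source B, iterated in insertion order: (keyword, (priority, label))
def KEYWORD_TABLE : List (String × Nat × String) :=
  [ ("lsd", 0, "psychedelic"), ("lyserg", 0, "psychedelic"),
    ("2c-", 1, "psychedelic"), ("25i", 1, "psychedelic"), ("25c", 1, "psychedelic"),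
    ("25b", 1, "psychedelic"), ("nbome", 1, "psychedelic"),
    ("dmt", 2, "psychedelic"), ("tryptamine", 2, "psychedelic"),
    ("psilocybin", 2, "psychedelic"), ("psilocin", 2, "psychedelic"),
    ("mescaline", 3, "psychedelic"), ("phenethylamine", 3, "psychedelic"),
    ("ketamine", 4, "dissociative"), ("pcp", 4, "dissociative"), ("pce", 4, "dissociative"),
    ("dxm", 4, "dissociative"), ("mxe", 4, "dissociative"),
    ("mdma", 5, "empathogen"), ("mda", 5, "empathogen"), ("apb", 5, "empathogen"),
    ("mapb", 5, "empathogen"), ("entactogen", 5, "empathogen"),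
    ("amphetamine", 6, "stimulant"), ("methamphet", 6, "stimulant"),
    ("cocaine", 6, "stimulant"), ("methylphen", 6, "stimulant"),
    ("cathinone", 7, "stimulant"), ("pvp", 7, "stimulant"), ("php", 7, "stimulant"),
    ("fma", 7, "stimulant"),
    ("morphine", 8, "opioid"), ("codeine", 8, "opioid"), ("fentanyl", 8, "opioid"),
    ("oxycodone", 8, "opioid"), ("hydrocodone", 8, "opioid"),
    ("tramadol", 9, "opioid"), ("methadone", 9, "opioid"),
    ("buprenorphine", 9, "opioid"), ("kratom", 9, "opioid"),
    ("thc", 10, "cannabinoid"), ("cannabinoid", 10, "cannabinoid"),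
    ("jwh", 10, "cannabinoid"), ("cannabis", 10, "cannabinoid"),
    ("diazepam", 11, "depressant"), ("alprazolam", 11, "depressant"),
    ("clonazepam", 11, "depressant"), ("lorazepam", 11, "depressant"),
    ("azolam", 11, "depressant"), ("azepam", 11, "depressant"),
    ("ghb", 12, "depressant"), ("phenibut", 12, "depressant"),
    ("barbital", 12, "depressant"), ("barbiturate", 12, "depressant"),
    ("diphenhydramine", 13, "deliriant"), ("dph", 13, "deliriant"),
    ("scopolamine", 13, "deliriant"), ("atropine", 13, "deliriant"),
    ("datura", 13, "deliriant"),
    ("racetam", 14, "nootropic"), ("noopept", 14, "nootropic"),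
    ("modafinil", 14, "nootropic") ]

-- Source B's loop: keep the matched entry of minimum priority in `best`
def pvBestLoop (best : Option (Nat × String)) (tbl : List (String × Nat × String)) (n : String) :
    Option (Nat × String) :=
  match tbl with
  | [] => best
  | (kw, prio, label) :: rest =>
    let best' :=
      if PySem.Str.isIn kw n &&
         (match best with | none => true | some b => decide (prio < b.1)) then
        some (prio, label)
      else best
    pvBestLoop best' rest n

def classify_drug_alt (drug_name : String) : String :=
  let name_lower := PySem.Str.lower drug_name
  match pvBestLoop none KEYWORD_TABLE name_lower with
  | none => "other"
  | some b => b.2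

-- ===== PRECONDITION & SPEC =====
def Spec_classify_drug (drug_name : String) (out : String) : Prop := out = classify_drug_alt drug_name
instance (drug_name : String) (out : String) : Decidable (Spec_classify_drug drug_name out) := by
  unfold Spec_classify_drug; infer_instance

-- ===== CLAIM =====
def Claim_equal_classify_drug : Prop :=
  ∀ (drug_name : String), Dom_classify_drug drug_name → Spec_classify_drug drug_name (classify_drug drug_name)

-- ===== LEMMAS AND PROOFS =====

-- proof-side characterisation of the loop: the FIRST matching entry
def pvFirst (tbl : List (String × Nat × String)) (n : String) : Option (Nat × String) :=
  match tbl with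
  | [] => none
  | (kw, prio, label) :: rest =>
    if PySem.Str.isIn kw n then some (prio, label) else pvFirst rest n

-- once `best` holds a priority ≤ every remaining one, the (strict-<) loop never replaces it
theorem pvBestLoop_stuck : ∀ (tbl : List (String × Nat × String)) (n : String) (p : Nat) (l : String),
    (∀ e ∈ tbl, p ≤ e.2.1) → pvBestLoop (some (p, l)) tbl n = some (p, l)
  | [], _, _, _, _ => rfl
  | (kw, q, lab) :: rest, n, p, l, h => by
      have hq : p ≤ q := h (kw, q, lab) (List.mem_cons_self)
      have hrest := pvBestLoop_stuck rest n p l (fun e he => h e (List.mem_cons_of_mem _ he))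
      simp only [pvBestLoop]
      have : decide (q < p) = false := by simp [Nat.not_lt.mpr hq]
      simp [this, hrest]

-- on a priority-nondecreasing table, min-priority-accumulation = first match
theorem pvBestLoop_eq_first : ∀ (tbl : List (String × Nat × String)) (n : String),
    List.Pairwise (fun a b => a.2.1 ≤ b.2.1) tbl →
    pvBestLoop none tbl n = pvFirst tbl n
  | [], _, _ => rfl
  | (kw, q, lab) :: rest, n, h => by
      rcases List.pairwise_cons.mp h with ⟨hq, hrest⟩
      by_cases hin : PySem.Chars.isIn kw.toList n.toList = true
      · simp [pvBestLoop, pvFirst, hin, pvBestLoop_stuck rest n q lab hq]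
      · simp [pvBestLoop, pvFirst, hin, pvBestLoop_eq_first rest n hrest]

-- a block of entries sharing one (priority,label): first-match = any-match
theorem pvFirst_block : ∀ (kws : List String) (p : Nat) (l : String)
    (rest : List (String × Nat × String)) (n : String),
    pvFirst (kws.map (fun k => (k, p, l)) ++ rest) n =
      if kws.any (fun k => PySem.Str.isIn k n) then some (p, l) else pvFirst rest n
  | [], _, _, _, _ => by simp
  | k :: ks, p, l, rest, n => by
      by_cases hk : PySem.Chars.isIn k.toList n.toList = true
      · simp [pvFirst, hk]
      · simp [pvFirst, hk, pvFirst_block ks p l rest n]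

theorem KEYWORD_TABLE_blocks : KEYWORD_TABLE =
    (["lsd", "lyserg"].map (fun k => (k, 0, "psychedelic")) ++
    (["2c-", "25i", "25c", "25b", "nbome"].map (fun k => (k, 1, "psychedelic")) ++
    (["dmt", "tryptamine", "psilocybin", "psilocin"].map (fun k => (k, 2, "psychedelic")) ++
    (["mescaline", "phenethylamine"].map (fun k => (k, 3, "psychedelic")) ++
    (["ketamine", "pcp", "pce", "dxm", "mxe"].map (fun k => (k, 4, "dissociative")) ++
    (["mdma", "mda", "apb", "mapb", "entactogen"].map (fun k => (k, 5, "empathogen")) ++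
    (["amphetamine", "methamphet", "cocaine", "methylphen"].map (fun k => (k, 6, "stimulant")) ++
    (["cathinone", "pvp", "php", "fma"].map (fun k => (k, 7, "stimulant")) ++
    (["morphine", "codeine", "fentanyl", "oxycodone", "hydrocodone"].map (fun k => (k, 8, "opioid")) ++
    (["tramadol", "methadone", "buprenorphine", "kratom"].map (fun k => (k, 9, "opioid")) ++
    (["thc", "cannabinoid", "jwh", "cannabis"].map (fun k => (k, 10, "cannabinoid")) ++
    (["diazepam", "alprazolam", "clonazepam", "lorazepam", "azolam", "azepam"].map (fun k => (k, 11, "depressant")) ++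
    (["ghb", "phenibut", "barbital", "barbiturate"].map (fun k => (k, 12, "depressant")) ++
    (["diphenhydramine", "dph", "scopolamine", "atropine", "datura"].map (fun k => (k, 13, "deliriant")) ++
    (["racetam", "noopept", "modafinil"].map (fun k => (k, 14, "nootropic")) ++
    ([] : List (String × Nat × String))))))))))))))))) := by rfl

theorem KEYWORD_TABLE_sorted : List.Pairwise (fun (a b : String × Nat × String) => a.2.1 ≤ b.2.1) KEYWORD_TABLE := by
  decide

-- ===== VERDICT =====
set_option maxHeartbeats 1000000 in
theorem classify_drug_spec : Claim_equal_classify_drug := by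
  intro s _
  unfold Spec_classify_drug classify_drug classify_drug_alt
  simp only [DRUG_TO_CLASS, PySem.Dict.get?, PySem.Dict.empty]
  rw [pvBestLoop_eq_first KEYWORD_TABLE (PySem.Str.lower s) KEYWORD_TABLE_sorted,
      KEYWORD_TABLE_blocks]
  rw [pvFirst_block, pvFirst_block, pvFirst_block, pvFirst_block, pvFirst_block,
      pvFirst_block, pvFirst_block, pvFirst_block, pvFirst_block, pvFirst_block,
      pvFirst_block, pvFirst_block, pvFirst_block, pvFirst_block, pvFirst_block]
  simp only [pvFirst]
  by_cases h1 : (["lsd", "lyserg"].any fun x => PySem.Str.isIn x (PySem.Str.lower s)) = true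
  · simp only [if_pos h1]; rfl
  simp only [if_neg h1]
  by_cases h2 : (["2c-", "25i", "25c", "25b", "nbome"].any fun x => PySem.Str.isIn x (PySem.Str.lower s)) = true
  · simp only [if_pos h2]; rfl
  simp only [if_neg h2]
  by_cases h3 : (["dmt", "tryptamine", "psilocybin", "psilocin"].any fun x => PySem.Str.isIn x (PySem.Str.lower s)) = true
  · simp only [if_pos h3]; rfl
  simp only [if_neg h3]
  by_cases h4 : (["mescaline", "phenethylamine"].any fun x => PySem.Str.isIn x (PySem.Str.lower s)) = true
  · simp only [if_pos h4]; rfl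
  simp only [if_neg h4]
  by_cases h5 : (["ketamine", "pcp", "pce", "dxm", "mxe"].any fun x => PySem.Str.isIn x (PySem.Str.lower s)) = true
  · simp only [if_pos h5]; rfl
  simp only [if_neg h5]
  by_cases h6 : (["mdma", "mda", "apb", "mapb", "entactogen"].any fun x => PySem.Str.isIn x (PySem.Str.lower s)) = true
  · simp only [if_pos h6]; rfl
  simp only [if_neg h6]
  by_cases h7 : (["amphetamine", "methamphet", "cocaine", "methylphen"].any fun x => PySem.Str.isIn x (PySem.Str.lower s)) = true
  · simp only [if_pos h7]; rfl
  simp only [if_neg h7]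
  by_cases h8 : (["cathinone", "pvp", "php", "fma"].any fun x => PySem.Str.isIn x (PySem.Str.lower s)) = true
  · simp only [if_pos h8]; rfl
  simp only [if_neg h8]
  by_cases h9 : (["morphine", "codeine", "fentanyl", "oxycodone", "hydrocodone"].any fun x => PySem.Str.isIn x (PySem.Str.lower s)) = true
  · simp only [if_pos h9]; rfl
  simp only [if_neg h9]
  by_cases h10 : (["tramadol", "methadone", "buprenorphine", "kratom"].any fun x => PySem.Str.isIn x (PySem.Str.lower s)) = true
  · simp only [if_pos h10]; rfl
  simp only [if_neg h10]
  by_cases h11 : (["thc", "cannabinoid", "jwh", "cannabis"].any fun x => PySem.Str.isIn x (PySem.Str.lower s)) = true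
  · simp only [if_pos h11]; rfl
  simp only [if_neg h11]
  by_cases h12 : (["diazepam", "alprazolam", "clonazepam", "lorazepam", "azolam", "azepam"].any fun x => PySem.Str.isIn x (PySem.Str.lower s)) = true
  · simp only [if_pos h12]; rfl
  simp only [if_neg h12]
  by_cases h13 : (["ghb", "phenibut", "barbital", "barbiturate"].any fun x => PySem.Str.isIn x (PySem.Str.lower s)) = true
  · simp only [if_pos h13]; rfl
  simp only [if_neg h13]
  by_cases h14 : (["diphenhydramine", "dph", "scopolamine", "atropine", "datura"].any fun x => PySem.Str.isIn x (PySem.Str.lower s)) = true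
  · simp only [if_pos h14]; rfl
  simp only [if_neg h14]
  by_cases h15 : (["racetam", "noopept", "modafinil"].any fun x => PySem.Str.isIn x (PySem.Str.lower s)) = true
  · simp only [if_pos h15]; rfl
  simp only [if_neg h15]
  rfl
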